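-- pv_equiv track=rewrite | github.com/bookwyrm-social/bookwyrm | fedireads/connectors/openlibrary.py | pick_default_edition
-- ===== SOURCE A (Python) =====
-- def pick_default_edition(options):
--     ''' favor physical copies with covers in english '''
--     if not options:
--         return None
--     if len(options) == 1:
--         return options[0]
--
--     options = [e for e in options if e.get('cover')] or options
--     options = [e for e in options if \
--         '/languages/eng' in str(e.get('languages'))] or options
--     formats = ['paperback', 'hardcover', 'mass market paperback']
--     options = [e for e in options if \
--         str(e.get('physical_format')).lower() in formats] or options
--     options = [e for e in options if e.get('isbn_13')] or options
--     options = [e for e in options if e.get('ocaid')] or options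
--     return options[0]
-- ===== SOURCE B (Python) =====
-- def pick_default_edition(options):
--     ''' favor physical copies with covers in english '''
--     if not options:
--         return None
--     formats = ('paperback', 'hardcover', 'mass market paperback')
--     def score(e):
--         return (16 * bool(e.get('cover'))
--                 + 8 * ('/languages/eng' in str(e.get('languages')))
--                 + 4 * (str(e.get('physical_format')).lower() in formats)
--                 + 2 * bool(e.get('isbn_13'))
--                 + bool(e.get('ocaid')))
--     return max(options, key=score)
-- ===== Notes on version B (the rewrite author's own statement) =====
-- stated objective: simpler
-- what changed: The five sequential filter-with-fallback passes are replaced by a single max(options, key=score) over one composite weighted score (16/8/4/2/1 for the five preference bits), exploiting that max returns the first element with the maximal score, which equals the head of the fallback-filter chain.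
import Mathlib
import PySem

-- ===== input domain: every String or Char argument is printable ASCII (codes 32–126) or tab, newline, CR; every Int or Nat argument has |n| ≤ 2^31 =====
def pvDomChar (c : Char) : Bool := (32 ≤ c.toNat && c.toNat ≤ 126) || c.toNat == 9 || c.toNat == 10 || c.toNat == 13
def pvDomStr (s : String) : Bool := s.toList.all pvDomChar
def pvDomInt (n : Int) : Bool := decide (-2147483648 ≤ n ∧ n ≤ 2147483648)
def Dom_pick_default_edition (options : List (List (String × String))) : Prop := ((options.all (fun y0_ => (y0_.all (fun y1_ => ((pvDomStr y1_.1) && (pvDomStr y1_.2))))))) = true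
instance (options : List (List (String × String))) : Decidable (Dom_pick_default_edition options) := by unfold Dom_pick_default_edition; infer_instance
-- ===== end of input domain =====

-- B replaces A's five sequential filter-with-fallback passes by a single first-argmax over one
-- composite weighted score (objective: simpler, one pass instead of five; same return value).

-- shared transliterations of the five Python predicates (bool(e.get(..)), substring test, format test)
def pvTruthy (o : Option String) : Bool :=
  match o with
  | some s => !(s == "")
  | none => false

-- str(v) where v is e.get(k): 'None' for a missing key, the string itself otherwise
def pvStr (o : Option String) : String :=
  match o with
  | some s => s
  | none => "None"

def pvCover (e : List (String × String)) : Bool := pvTruthy (PySem.Dict.get? (PySem.Dict.mk e) "cover")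
def pvEng (e : List (String × String)) : Bool :=
  PySem.Str.isIn "/languages/eng" (pvStr (PySem.Dict.get? (PySem.Dict.mk e) "languages"))
def pvFormat (e : List (String × String)) : Bool :=
  ["paperback", "hardcover", "mass market paperback"].contains
    (PySem.Str.lower (pvStr (PySem.Dict.get? (PySem.Dict.mk e) "physical_format")))
def pvIsbn (e : List (String × String)) : Bool := pvTruthy (PySem.Dict.get? (PySem.Dict.mk e) "isbn_13")
def pvOcaid (e : List (String × String)) : Bool := pvTruthy (PySem.Dict.get? (PySem.Dict.mk e) "ocaid")

-- ===== PORT A =====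
-- '[e for e in xs if p(e)] or xs'
def pvStep {α : Type} (p : α → Bool) (xs : List α) : List α :=
  let f := xs.filter p
  if f.isEmpty then xs else f

def pick_default_edition (options : List (List (String × String))) : Option (List (String × String)) :=
  if options.isEmpty then none
  else if options.length == 1 then PySem.List.pyGet? options 0
  else
    let o1 := pvStep pvCover options
    let o2 := pvStep pvEng o1
    let o3 := pvStep pvFormat o2
    let o4 := pvStep pvIsbn o3
    let o5 := pvStep pvOcaid o4
    PySem.List.pyGet? o5 0

-- ===== PORT B =====
def pvScore (e : List (String × String)) : Nat :=
  16 * (pvCover e).toNat + 8 * (pvEng e).toNat + 4 * (pvFormat e).toNat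
    + 2 * (pvIsbn e).toNat + (pvOcaid e).toNat

def pick_default_edition_alt (options : List (List (String × String))) : Option (List (String × String)) :=
  if options.isEmpty then none
  else PySem.List.max? options pvScore

-- ===== PRECONDITION & SPEC =====
def Spec_pick_default_edition (options : List (List (String × String))) (out : Option (List (String × String))) : Prop := out = pick_default_edition_alt options
instance (options : List (List (String × String))) (out : Option (List (String × String))) : Decidable (Spec_pick_default_edition options out) := by unfold Spec_pick_default_edition; infer_instance

-- ===== CLAIM (what is proved, stated in full; the proofs are below) =====
def Claim_equal_pick_default_edition : Prop := ∀ (options : List (List (String × String))), Dom_pick_default_edition options → Spec_pick_default_edition options (pick_default_edition options)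

-- ===== LEMMAS AND PROOFS =====

-- the elements of xs whose score is maximal in xs, in order
def pvMaxSel {α : Type} (s : α → Nat) (xs : List α) : List α :=
  xs.filter (fun e => xs.all (fun y => decide (s y ≤ s e)))

theorem pvStep_eq {α : Type} (p : α → Bool) (xs : List α) :
    pvStep p xs = pvMaxSel (fun e => (p e).toNat) xs := by
  by_cases h : xs.filter p = []
  · have hall : ∀ a ∈ xs, p a = false := by
      intro a ha
      simpa using List.filter_eq_nil_iff.mp h a ha
    simp only [pvStep, h, List.isEmpty_nil, if_true]
    unfold pvMaxSel
    symm
    rw [List.filter_eq_self]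
    intro e _
    rw [List.all_eq_true]
    intro y hy
    simp [hall y hy]
  · obtain ⟨w, hw, hpw⟩ : ∃ w ∈ xs, p w = true := by
      by_contra hc
      exact h (List.filter_eq_nil_iff.mpr (fun a ha hpa => hc ⟨a, ha, hpa⟩))
    have hne : (xs.filter p).isEmpty = false := by
      simp [h]
    simp only [pvStep, hne, Bool.false_eq_true, if_false]
    unfold pvMaxSel
    apply List.filter_congr
    intro e _
    cases hpe : p e
    · symm
      rw [List.all_eq_false]
      exact ⟨w, hw, by simp [hpw, hpe]⟩
    · symm
      rw [List.all_eq_true]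
      intro y hy
      have := Bool.toNat_le (p y)
      simp only [hpe, decide_eq_true_iff, Bool.toNat_true]
      omega

theorem pvMaxSel_comp {α : Type} (s : α → Nat) (p : α → Bool) (xs : List α) :
    pvMaxSel (fun e => (p e).toNat) (pvMaxSel s xs)
      = pvMaxSel (fun e => 2 * s e + (p e).toNat) xs := by
  unfold pvMaxSel
  rw [List.filter_filter]
  apply List.filter_congr
  intro e he
  rw [Bool.eq_iff_iff]
  simp only [Bool.and_eq_true, List.all_eq_true, List.mem_filter, decide_eq_true_iff]
  constructor
  · rintro ⟨h2, h1⟩ y hy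
    have hy1 := h1 y hy
    have hty := Bool.toNat_le (p y)
    have hte := Bool.toNat_le (p e)
    by_cases heq : s y = s e
    · have hP1y : ∀ z ∈ xs, s z ≤ s y := by
        intro z hz
        have := h1 z hz
        omega
      have := h2 y ⟨hy, hP1y⟩
      omega
    · omega
  · intro hS
    have hty := Bool.toNat_le (p e)
    refine ⟨?_, ?_⟩
    · rintro y ⟨hy, hall⟩
      have hye : s e ≤ s y := hall e he
      have := hS y hy
      have := Bool.toNat_le (p y)
      omega
    · intro y hy
      have := hS y hy
      have := Bool.toNat_le (p y)
      omega

theorem pvMaxSel_congr {α : Type} (s s' : α → Nat) (xs : List α) (h : ∀ e, s e = s' e) :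
    pvMaxSel s xs = pvMaxSel s' xs := by
  rw [show s = s' from funext h]

theorem pvChain_eq (xs : List (List (String × String))) :
    pvStep pvOcaid (pvStep pvIsbn (pvStep pvFormat (pvStep pvEng (pvStep pvCover xs))))
      = pvMaxSel pvScore xs := by
  rw [pvStep_eq pvCover, pvStep_eq pvEng,
      pvMaxSel_comp]
  rw [pvStep_eq pvFormat, pvMaxSel_comp]
  rw [pvStep_eq pvIsbn, pvMaxSel_comp]
  rw [pvStep_eq pvOcaid, pvMaxSel_comp]
  apply pvMaxSel_congr
  intro e
  unfold pvScore
  ring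

theorem pvMaxSel_head {α : Type} (s : α → Nat) :
    ∀ (t : List α) (x : α),
      (pvMaxSel s (x :: t)).head? = some (t.foldl (fun m e => if s m < s e then e else m) x) := by
  intro t
  induction t with
  | nil =>
    intro x
    simp [pvMaxSel]
  | cons e u ih =>
    intro x
    rw [List.foldl_cons]
    rw [← ih (if s x < s e then e else x)]
    by_cases h : s x < s e
    · rw [if_pos h]
      have hlist : pvMaxSel s (x :: e :: u) = pvMaxSel s (e :: u) := by
        unfold pvMaxSel
        have hx : ((x :: e :: u).all (fun y => decide (s y ≤ s x))) = false := by
          rw [List.all_eq_false]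
          exact ⟨e, by simp, by simp; omega⟩
        rw [List.filter_cons_of_neg (by simp [hx])]
        apply List.filter_congr
        intro z _
        rw [Bool.eq_iff_iff]
        simp only [List.all_cons, Bool.and_eq_true, decide_eq_true_iff]
        constructor
        · rintro ⟨_, h2, h3⟩; exact ⟨h2, h3⟩
        · rintro ⟨h2, h3⟩; exact ⟨by omega, h2, h3⟩
      rw [hlist]
    · rw [if_neg h]
      have hpt : ∀ z, ((x :: e :: u).all (fun y => decide (s y ≤ s z)))
          = ((x :: u).all (fun y => decide (s y ≤ s z))) := by
        intro z
        rw [Bool.eq_iff_iff]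
        simp only [List.all_cons, Bool.and_eq_true, decide_eq_true_iff, List.all_eq_true]
        constructor
        · rintro ⟨h1, _, h3⟩; exact ⟨h1, h3⟩
        · rintro ⟨h1, h3⟩; exact ⟨h1, by omega, h3⟩
      have hsel : pvMaxSel s (x :: e :: u) = (x :: e :: u).filter
          (fun z => (x :: u).all (fun y => decide (s y ≤ s z))) := by
        unfold pvMaxSel
        exact List.filter_congr (fun z _ => hpt z)
      rw [hsel]
      unfold pvMaxSel
      simp only [List.filter_cons]
      by_cases hRx : ((x :: u).all fun y => decide (s y ≤ s x)) = true
      · simp [hRx]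
      · have hRe' : ((x :: u).all fun y => decide (s y ≤ s e)) = false := by
          by_contra hc
          have hRe : ((x :: u).all fun y => decide (s y ≤ s e)) = true := by simpa using hc
          have hxe : s x ≤ s e := by simpa using (List.all_eq_true.mp hRe x (by simp))
          apply hRx
          rw [List.all_eq_true] at hRe ⊢
          intro y hy
          have := hRe y hy
          simp only [decide_eq_true_iff] at this ⊢
          omega
        simp [hRx, hRe']

theorem pvFoldlSome {α : Type} (s : α → Nat) :
    ∀ (t : List α) (m0 : α),
      t.foldl (fun acc x => match acc with
        | none => some x
        | some m => if s m < s x then some x else some m) (some m0)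
      = some (t.foldl (fun m e => if s m < s e then e else m) m0) := by
  intro t
  induction t with
  | nil => intro m0; rfl
  | cons e u ih =>
    intro m0
    simp only [List.foldl_cons]
    by_cases h : s m0 < s e
    · rw [if_pos h, if_pos h, ih]
    · rw [if_neg h, if_neg h, ih]

theorem pvMax?_cons {α : Type} (s : α → Nat) (x : α) (t : List α) :
    PySem.List.max? (x :: t) s = some (t.foldl (fun m e => if s m < s e then e else m) x) := by
  unfold PySem.List.max?
  rw [List.foldl_cons]
  exact pvFoldlSome s t x

theorem pvPyGet_zero {α : Type} (xs : List α) : PySem.List.pyGet? xs (0 : Int) = xs.head? := by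
  cases xs <;> simp [PySem.List.pyGet?, PySem.List.pyIdx?]

-- ===== VERDICT (by name: the statement is the Claim_ definition above) =====
theorem pick_default_edition_spec : Claim_equal_pick_default_edition := by
  intro options _
  unfold Spec_pick_default_edition
  match options with
  | [] => rfl
  | [x] =>
    show pick_default_edition [x] = pick_default_edition_alt [x]
    simp [pick_default_edition, pick_default_edition_alt, pvMax?_cons]
  | x :: y :: u =>
    show pick_default_edition (x :: y :: u) = pick_default_edition_alt (x :: y :: u)
    unfold pick_default_edition pick_default_edition_alt
    simp only [List.isEmpty_cons, Bool.false_eq_true, if_false, List.length_cons]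
    have hlen : ((u.length + 1 + 1 : Nat) == 1) = false := by
      rw [beq_eq_false_iff_ne]
      omega
    rw [hlen]
    simp only [Bool.false_eq_true, if_false]
    rw [pvChain_eq, pvPyGet_zero, pvMaxSel_head, pvMax?_cons]
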